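-- pv_equiv track=rewrite | github.com/jfranciscoguerrero/SPT-stromboli-explosions-pipeline | src/LSTM_analyzer.py | tiene_3_ceros_consecutivos
-- ===== SOURCE A (Python) =====
-- MIN_CONSEC_ZEROS = 4
--
-- def tiene_3_ceros_consecutivos(lst, min_consec=MIN_CONSEC_ZEROS):
--     if len(lst) < min_consec:
--         return False
--     run = 1
--     for i in range(1, len(lst)):
--         if lst[i] == lst[i - 1] + 1:
--             run += 1
--             if run >= min_consec:
--                 return True
--         else:
--             run = 1
--     return False
-- ===== SOURCE B (Python) =====
-- MIN_CONSEC_ZEROS = 4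
--
-- def tiene_3_ceros_consecutivos(lst, min_consec=MIN_CONSEC_ZEROS):
--     # increment indicator between each pair of neighbours
--     diffs = [b == a + 1 for a, b in zip(lst, lst[1:])]
--     # run-length encode the indicators
--     runs = []
--     for d in diffs:
--         if runs and runs[-1][0] == d:
--             runs[-1][1] += 1
--         else:
--             runs.append([d, 1])
--     # a streak of k incrementing elements is k-1 consecutive True indicators
--     return any(n >= min_consec - 1 for d, n in runs if d)
-- ===== Notes on version B (the rewrite author's own statement) =====
-- stated objective: idiomatic
-- what changed: Replaces A's counter-with-early-return index loop by a declarative pipeline: build the list of neighbour increment indicators, run-length encode it, and report whether any True run has length >= min_consec - 1.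
import Mathlib
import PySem

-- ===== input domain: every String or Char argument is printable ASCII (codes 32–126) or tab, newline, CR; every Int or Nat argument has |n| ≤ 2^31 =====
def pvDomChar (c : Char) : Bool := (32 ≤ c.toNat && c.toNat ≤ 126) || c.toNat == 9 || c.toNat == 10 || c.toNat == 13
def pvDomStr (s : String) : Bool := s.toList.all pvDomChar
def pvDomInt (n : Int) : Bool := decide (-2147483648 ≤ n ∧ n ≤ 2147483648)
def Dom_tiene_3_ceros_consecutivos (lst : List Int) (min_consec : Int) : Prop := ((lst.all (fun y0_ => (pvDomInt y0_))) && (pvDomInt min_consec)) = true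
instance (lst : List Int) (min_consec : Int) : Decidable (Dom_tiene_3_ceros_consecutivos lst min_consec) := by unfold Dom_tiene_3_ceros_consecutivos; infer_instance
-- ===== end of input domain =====

-- B recasts A's counter-with-early-return scan as: neighbour increment indicators,
-- run-length encoding, then "any True run of length ≥ min_consec - 1" (objective: idiomatic/alternative, same O(n) cost).

-- ===== PORT A =====
-- the for-loop over i in range(1, len(lst)): prev carries lst[i-1], run the counter; early return via `true`
def pvLoopA (min_consec : Int) : Int → List Int → Int → Bool
  | _, [], _ => false
  | prev, x :: xs, run =>
    if x == prev + 1 then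
      if run + 1 ≥ min_consec then true else pvLoopA min_consec x xs (run + 1)
    else pvLoopA min_consec x xs 1

def tiene_3_ceros_consecutivos (lst : List Int) (min_consec : Int) : Bool :=
  if (lst.length : Int) < min_consec then false
  else
    match lst with
    | [] => false
    | h :: t => pvLoopA min_consec h t 1

-- ===== PORT B =====
-- Source B's loop body: if runs and runs[-1][0] == d: runs[-1][1] += 1 else: runs.append([d, 1])
def pvPushRun : List (Bool × Int) → Bool → List (Bool × Int)
  | [], d => [(d, 1)]
  | (k, n) :: rest, d =>
    match rest with
    | [] => if k == d then [(k, n + 1)] else [(k, n), (d, 1)]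
    | _ :: _ => (k, n) :: pvPushRun rest d

def tiene_3_ceros_consecutivos_alt (lst : List Int) (min_consec : Int) : Bool :=
  let diffs := (lst.zip lst.tail).map (fun p => p.2 == p.1 + 1)
  let runs := diffs.foldl pvPushRun []
  runs.any (fun r => r.1 && decide (r.2 ≥ min_consec - 1))

-- ===== PRECONDITION & SPEC =====
def Spec_tiene_3_ceros_consecutivos (lst : List Int) (min_consec : Int) (out : Bool) : Prop := out = tiene_3_ceros_consecutivos_alt lst min_consec
instance (lst : List Int) (min_consec : Int) (out : Bool) : Decidable (Spec_tiene_3_ceros_consecutivos lst min_consec out) := by unfold Spec_tiene_3_ceros_consecutivos; infer_instance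

-- ===== CLAIM (what is proved, stated in full; the proofs are below) =====
def Claim_equal_tiene_3_ceros_consecutivos : Prop := ∀ (lst : List Int) (min_consec : Int), Dom_tiene_3_ceros_consecutivos lst min_consec → Spec_tiene_3_ceros_consecutivos lst min_consec (tiene_3_ceros_consecutivos lst min_consec)

-- ===== LEMMAS AND PROOFS =====

-- proof-side views of B's data
def pvHit (mc : Int) (rs : List (Bool × Int)) : Bool :=
  rs.any (fun r => r.1 && decide (r.2 ≥ mc - 1))

def pvTail (rs : List (Bool × Int)) : Int :=
  match rs.getLast? with
  | some (true, n) => n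
  | _ => 0

def pvDiffsFrom : Int → List Int → List Bool
  | _, [] => []
  | prev, x :: xs => (x == prev + 1) :: pvDiffsFrom x xs

theorem pvDiffs_eq (t : List Int) : ∀ h : Int,
    ((h :: t).zip t).map (fun p => p.2 == p.1 + 1) = pvDiffsFrom h t := by
  induction t with
  | nil => intro h; simp [pvDiffsFrom]
  | cons x xs ih =>
    intro h
    rw [show (h :: x :: xs).zip (x :: xs) = (h, x) :: (x :: xs).zip xs from rfl]
    rw [List.map_cons, ih x]
    rfl

theorem pvDiffsFrom_length (t : List Int) : ∀ h : Int, (pvDiffsFrom h t).length = t.length := by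
  induction t with
  | nil => intro h; simp [pvDiffsFrom]
  | cons x xs ih => intro h; simp [pvDiffsFrom, ih x]

theorem pvPushRun_append (rs : List (Bool × Int)) (k : Bool) (n : Int) (d : Bool) :
    pvPushRun (rs ++ [(k, n)]) d =
      if k == d then rs ++ [(k, n + 1)] else rs ++ [(k, n), (d, 1)] := by
  induction rs with
  | nil => simp [pvPushRun]
  | cons r rest ih =>
    obtain ⟨k', n'⟩ := r
    cases rest with
    | nil =>
      rw [show pvPushRun ([(k', n')] ++ [(k, n)]) d = (k', n') :: pvPushRun [(k, n)] d from rfl]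
      rw [show pvPushRun [(k, n)] d = if k == d then [(k, n + 1)] else [(k, n), (d, 1)] from rfl]
      split <;> simp
    | cons q qs =>
      rw [show pvPushRun (((k', n') :: q :: qs) ++ [(k, n)]) d
            = (k', n') :: pvPushRun ((q :: qs) ++ [(k, n)]) d from rfl]
      rw [ih]
      split <;> simp

theorem pvTail_push_true (rs : List (Bool × Int)) : pvTail (pvPushRun rs true) = pvTail rs + 1 := by
  rcases rs.eq_nil_or_concat with rfl | ⟨rs', ⟨k, n⟩, rfl⟩
  · simp [pvPushRun, pvTail]
  · rw [List.concat_eq_append, pvPushRun_append]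
    cases k <;> simp [pvTail]

theorem pvTail_push_false (rs : List (Bool × Int)) : pvTail (pvPushRun rs false) = 0 := by
  rcases rs.eq_nil_or_concat with rfl | ⟨rs', ⟨k, n⟩, rfl⟩
  · simp [pvPushRun, pvTail]
  · rw [List.concat_eq_append, pvPushRun_append]
    cases k <;> simp [pvTail]

theorem pvHit_push_false (mc : Int) (rs : List (Bool × Int)) :
    pvHit mc (pvPushRun rs false) = pvHit mc rs := by
  rcases rs.eq_nil_or_concat with rfl | ⟨rs', ⟨k, n⟩, rfl⟩
  · simp [pvPushRun, pvHit]
  · rw [List.concat_eq_append, pvPushRun_append]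
    cases k <;> simp [pvHit, List.any_append]

theorem pvHit_push_true (mc : Int) (rs : List (Bool × Int)) :
    pvHit mc (pvPushRun rs true) = (pvHit mc rs || decide (pvTail rs + 1 ≥ mc - 1)) := by
  rcases rs.eq_nil_or_concat with rfl | ⟨rs', ⟨k, n⟩, rfl⟩
  · simp [pvPushRun, pvHit, pvTail]
  · rw [List.concat_eq_append, pvPushRun_append]
    cases k
    · simp [pvHit, pvTail, List.any_append]
      congr 1
    · simp only [pvHit, pvTail, List.any_append, List.getLast?_concat, List.any_cons,
        List.any_nil, Bool.true_and, Bool.or_false]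
      by_cases h : n ≥ mc - 1
      · have h' : n + 1 ≥ mc - 1 := by omega
        simp only [h, h', ge_iff_le, decide_true, Bool.or_true]
        simp only [List.any_eq_true]
        exact ⟨(true, n + 1), by simp, by simp; omega⟩
      · simp [h]

theorem pvHit_mono (mc : Int) (ds : List Bool) : ∀ rs : List (Bool × Int),
    pvHit mc rs = true → pvHit mc (ds.foldl pvPushRun rs) = true := by
  induction ds with
  | nil => intro rs h; simpa using h
  | cons d ds ih =>
    intro rs h
    apply ih
    cases d
    · rwa [pvHit_push_false]
    · rw [pvHit_push_true, h]; simp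

theorem pvLoopA_eq_hit (mc : Int) (rest : List Int) : ∀ (prev run : Int) (rs : List (Bool × Int)),
    pvHit mc rs = false → run = 1 + pvTail rs →
    pvLoopA mc prev rest run = pvHit mc ((pvDiffsFrom prev rest).foldl pvPushRun rs) := by
  induction rest with
  | nil =>
    intro prev run rs hrs _
    simp [pvLoopA, pvDiffsFrom, hrs]
  | cons x xs ih =>
    intro prev run rs hrs hrun
    simp only [pvDiffsFrom, List.foldl_cons]
    by_cases hd : x = prev + 1
    · have hb : (x == prev + 1) = true := by simp [hd]
      rw [hb]
      simp only [pvLoopA, hb, if_true]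
      by_cases hge : run + 1 ≥ mc
      · have : pvHit mc (pvPushRun rs true) = true := by
          rw [pvHit_push_true, hrs]
          simp only [Bool.false_or, decide_eq_true_eq]
          omega
        rw [if_pos hge, pvHit_mono mc _ _ this]
      · rw [if_neg hge]
        apply ih
        · rw [pvHit_push_true, hrs]
          simp only [Bool.false_or, decide_eq_false_iff_not]
          omega
        · rw [pvTail_push_true]; omega
    · have hb : (x == prev + 1) = false := by simp [hd]
      rw [hb]
      simp only [pvLoopA, hb, Bool.false_eq_true, if_false]
      apply ih
      · rw [pvHit_push_false]; exact hrs
      · rw [pvTail_push_false]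
        omega
    
theorem pvPush_bound (rs : List (Bool × Int)) (d : Bool) (B : Int) (hB : 0 ≤ B)
    (h : ∀ p ∈ rs, p.2 ≤ B) : ∀ q ∈ pvPushRun rs d, q.2 ≤ B + 1 := by
  induction rs with
  | nil =>
    intro q hq
    simp only [pvPushRun, List.mem_singleton] at hq
    subst hq
    show (1 : Int) ≤ B + 1
    omega
  | cons r rest ih =>
    obtain ⟨k, n⟩ := r
    intro q hq
    have hn : n ≤ B := h (k, n) (by simp)
    cases rest with
    | nil =>
      simp only [pvPushRun] at hq
      split at hq <;>
        simp only [List.mem_cons, List.not_mem_nil, or_false] at hq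
      · subst hq
        show n + 1 ≤ B + 1
        omega
      · rcases hq with rfl | rfl
        · show n ≤ B + 1
          omega
        · show (1 : Int) ≤ B + 1
          omega
    | cons a as =>
      simp only [pvPushRun, List.mem_cons] at hq
      rcases hq with rfl | hq
      · show n ≤ B + 1
        omega
      · exact ih (fun p hp => h p (List.mem_cons_of_mem _ hp)) q hq

theorem pvFold_bound (ds : List Bool) : ∀ (rs : List (Bool × Int)) (B : Int), 0 ≤ B →
    (∀ p ∈ rs, p.2 ≤ B) → ∀ q ∈ ds.foldl pvPushRun rs, q.2 ≤ B + ds.length := by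
  induction ds with
  | nil => intro rs B hB h q hq; simpa using h q hq
  | cons d ds ih =>
    intro rs B hB h q hq
    have := ih (pvPushRun rs d) (B + 1) (by omega) (pvPush_bound rs d B hB h) q
      (by simpa using hq)
    simp at this ⊢
    omega

theorem pvHit_length (mc : Int) (ds : List Bool)
    (h : pvHit mc (ds.foldl pvPushRun []) = true) : mc - 1 ≤ (ds.length : Int) := by
  rw [pvHit, List.any_eq_true] at h
  obtain ⟨q, hq, hval⟩ := h
  have hb := pvFold_bound ds [] 0 le_rfl (by simp) q hq
  simp at hval hb
  omega

-- ===== VERDICT (by name: the statement is the Claim_ definition above) =====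
theorem tiene_3_ceros_consecutivos_spec : Claim_equal_tiene_3_ceros_consecutivos := by
  intro lst mc _
  unfold Spec_tiene_3_ceros_consecutivos
  cases lst with
  | nil => simp [tiene_3_ceros_consecutivos, tiene_3_ceros_consecutivos_alt]
  | cons h t =>
    have halt : tiene_3_ceros_consecutivos_alt (h :: t) mc
        = pvHit mc ((pvDiffsFrom h t).foldl pvPushRun []) := by
      simp only [tiene_3_ceros_consecutivos_alt, List.tail_cons, pvDiffs_eq, pvHit]
    by_cases hlen : ((h :: t).length : Int) < mc
    · rw [tiene_3_ceros_consecutivos, if_pos hlen, halt]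
      by_contra hne
      have hhit : pvHit mc ((pvDiffsFrom h t).foldl pvPushRun []) = true := by
        cases hv : pvHit mc ((pvDiffsFrom h t).foldl pvPushRun []) with
        | false => exact absurd hv.symm hne
        | true => rfl
      have := pvHit_length mc _ hhit
      rw [pvDiffsFrom_length] at this
      simp at hlen
      omega
    · rw [tiene_3_ceros_consecutivos, if_neg hlen, halt]
      exact pvLoopA_eq_hit mc t h 1 [] (by simp [pvHit]) (by simp [pvTail])
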